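-- pv_equiv track=rewrite | github.com/Saeed-beepboop/parsing_docs | streamlit_july3.py | tidy_text
-- ===== SOURCE A (Python) =====
-- def tidy_text(user_catsubcat):
--     user_subcat_sep = user_catsubcat.splitlines()
--     user_subcat_sep_clean = []
--     for i in user_subcat_sep:
--         i.strip()
--         user_subcat_sep_clean.append(i)
--
--     particular_value = ''
--     result = []
--     temp_list = []
--     for i in user_subcat_sep_clean:
--         if i == particular_value:
--             temp_list.append(i)
--             result.append(temp_list)
--             temp_list = []
--         else:
--             temp_list.append(i)
--     result.append(temp_list)
--
--     for list in result:
--         if '' in list: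
--             list.remove('')
--
--     return result
-- ===== SOURCE B (Python) =====
-- def tidy_text(user_catsubcat):
--     # Build the grouping back-to-front: walk the lines in reverse, prepending
--     # to the current (front) group and opening a new empty group at each blank line.
--     groups = [[]]
--     for line in reversed(user_catsubcat.splitlines()):
--         if line == '':
--             groups.insert(0, [])
--         else:
--             groups[0].insert(0, line)
--     return groups
-- ===== Notes on version B (the rewrite author's own statement) =====
-- stated objective: simpler
-- what changed: B builds the grouping back-to-front with one reversed pass that prepends lines and opens a group at each blank, replacing A's no-op cleaning pass, accumulate-append-with-sentinel pass and the final remove('') fix-up pass.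
import Mathlib
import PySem

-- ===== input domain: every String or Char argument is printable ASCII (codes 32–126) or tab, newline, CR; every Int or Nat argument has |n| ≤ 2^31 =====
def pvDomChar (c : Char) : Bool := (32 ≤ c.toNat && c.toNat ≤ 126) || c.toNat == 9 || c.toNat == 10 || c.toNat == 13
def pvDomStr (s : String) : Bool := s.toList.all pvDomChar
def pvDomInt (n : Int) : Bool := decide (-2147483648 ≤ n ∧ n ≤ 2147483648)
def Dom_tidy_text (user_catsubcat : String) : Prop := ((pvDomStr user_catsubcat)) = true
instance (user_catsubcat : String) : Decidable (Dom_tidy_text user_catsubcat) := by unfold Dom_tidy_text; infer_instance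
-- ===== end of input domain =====

-- B replaces A's three passes (no-op clean, accumulate-with-''-sentinel, remove('') fix-up)
-- by a single reversed pass building the grouping back-to-front: simpler, same cost.

-- ===== PORT A =====
-- body of A's grouping loop
def pvAStep (st : List (List String) × List String) (i : String) : List (List String) × List String :=
  if i = "" then (st.1 ++ [st.2 ++ [i]], []) else (st.1, st.2 ++ [i])

-- body of A's final loop: 'if "" in list: list.remove("")' (guarded, so remove? is always some)
def pvRm (l : List String) : List String :=
  if "" ∈ l then (PySem.List.remove? l "").getD l else l

def tidy_text (user_catsubcat : String) : List (List String) :=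
  let user_subcat_sep := PySem.Str.splitlines user_catsubcat
  -- cleaning loop: 'i.strip()' is computed and discarded, then i is appended
  let user_subcat_sep_clean :=
    user_subcat_sep.foldl (fun acc i => let _ := PySem.Str.strip i; acc ++ [i]) []
  let st := user_subcat_sep_clean.foldl pvAStep ([], [])
  let result := st.1 ++ [st.2]
  result.map pvRm

-- ===== PORT B =====
-- body of B's loop: open a new front group at a blank line, else prepend to the front group
def pvStep (line : String) (groups : List (List String)) : List (List String) :=
  if line = "" then [] :: groups
  else match groups with
    | [] => [[line]]          -- unreachable: groups starts at [[]] and never empties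
    | g :: rest => (line :: g) :: rest

-- 'for line in reversed(lines): …prepend…' is exactly a foldr over lines
def tidy_text_alt (user_catsubcat : String) : List (List String) :=
  (PySem.Str.splitlines user_catsubcat).foldr pvStep [[]]

-- ===== PRECONDITION & SPEC =====
def Spec_tidy_text (user_catsubcat : String) (out : List (List String)) : Prop := out = tidy_text_alt user_catsubcat
instance (user_catsubcat : String) (out : List (List String)) : Decidable (Spec_tidy_text user_catsubcat out) := by unfold Spec_tidy_text; infer_instance

-- ===== CLAIM (what is proved, stated in full; the proofs are below) =====
def Claim_equal_tidy_text : Prop := ∀ (user_catsubcat : String), Dom_tidy_text user_catsubcat → Spec_tidy_text user_catsubcat (tidy_text user_catsubcat)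

-- ===== LEMMAS AND PROOFS =====

lemma pvRm_of_not_mem (l : List String) (h : "" ∉ l) : pvRm l = l := by
  simp [pvRm, h]

lemma pvRm_append_blank (l : List String) (h : "" ∉ l) : pvRm (l ++ [""]) = l := by
  have hm : "" ∈ l ++ [""] := by simp
  simp [pvRm, hm, PySem.List.remove?_eq_some_erase _ _ hm, List.erase_append_right _ h]

lemma foldr_pvStep_ne_nil (lines : List String) :
    lines.foldr pvStep [[]] ≠ [] := by
  induction lines with
  | nil => simp
  | cons x t ih =>
    cases h : t.foldr pvStep [[]] with
    | nil => exact absurd h ih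
    | cons g rest => simp [pvStep, h]; split <;> simp

-- main invariant: A's grouping + remove('') passes, started from (res, temp) with no ""
-- in temp, produce map pvRm res followed by B's grouping of the remaining lines with
-- temp prepended onto its first group.
lemma pvMain (lines : List String) :
    ∀ (res : List (List String)) (temp : List String), "" ∉ temp →
      ((lines.foldl pvAStep (res, temp)).1 ++ [(lines.foldl pvAStep (res, temp)).2]).map pvRm
      = res.map pvRm ++
          (match lines.foldr pvStep [[]] with
            | [] => [temp]
            | g :: rest => (temp ++ g) :: rest) := by
  induction lines with
  | nil =>
    intro res temp htemp
    simp [pvRm_of_not_mem temp htemp]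
  | cons x t ih =>
    intro res temp htemp
    by_cases hx : x = ""
    · subst hx
      rw [List.foldl_cons]
      have hstep : pvAStep (res, temp) "" = (res ++ [temp ++ [""]], []) := by simp [pvAStep]
      rw [hstep, ih _ _ (by simp)]
      cases h : t.foldr pvStep [[]] with
      | nil => exact absurd h (foldr_pvStep_ne_nil t)
      | cons g rest => simp [pvStep, h, pvRm_append_blank temp htemp]
    · rw [List.foldl_cons]
      have hstep : pvAStep (res, temp) x = (res, temp ++ [x]) := by simp [pvAStep, hx]
      have hmem : "" ∉ temp ++ [x] := by
        intro hm
        rcases List.mem_append.1 hm with h1 | h1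
        · exact htemp h1
        · simp at h1; exact hx h1
      rw [hstep, ih _ _ hmem]
      cases h : t.foldr pvStep [[]] with
      | nil => exact absurd h (foldr_pvStep_ne_nil t)
      | cons g rest => simp [pvStep, h, hx]

lemma pvClean (lines : List String) :
    lines.foldl (fun acc i => let _ := PySem.Str.strip i; acc ++ [i]) ([] : List String)
      = lines := by
  simpa using PySem.List.foldl_append_singleton lines []

-- ===== VERDICT (by name: the statement is the Claim_ definition above) =====
theorem tidy_text_spec : Claim_equal_tidy_text := by
  intro s _
  show tidy_text s = tidy_text_alt s
  simp only [tidy_text, tidy_text_alt]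
  rw [pvClean, pvMain (PySem.Str.splitlines s) [] [] (by simp)]
  cases h : (PySem.Str.splitlines s).foldr pvStep [[]] with
  | nil => exact absurd h (foldr_pvStep_ne_nil _)
  | cons g rest => simp
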